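-- pv_equiv track=rewrite | github.com/fosdick/map-gen | mp2lisp.py | color2use
-- ===== SOURCE A (Python) =====
-- def color2use(color):
--         while True:
--             if color == (252,198,137) or color == (255,247,153):
--                 return 'cover'
--             elif color == (198,156,109) or color == (255,125,125):
--                 return 'plaza'
--             elif color == (196,181,255) or color == (109,207,246):
--                 return 'Commmer'
--             elif color == (255,125,0):
--                 return 'mroads'
--             elif color == (168,99,168) or color == (145,61,105):
--                 return 'Idust'
--             elif color == (109,207,246):
--                 return 'Retail'
--             elif color == (0, 166,80):
--                 return 'Res'
--             elif color == (0,114,54) or color == (222,237,203):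
--                 return 'alley'
--             elif color == (237,27,35):
--                 return 'Center'
--             elif color == (0,0,255):
--                 return 'edge'
--             elif color == (255,255,0):
--                 return 'ped'
--             elif 0==0:
--                 return 'False'
-- ===== SOURCE B (Python) =====
-- # Binary search over a sorted table of (RGB, label) pairs; 'False' on no match.
-- _TABLE = [
--     ((0, 0, 255), 'edge'),
--     ((0, 114, 54), 'alley'),
--     ((0, 166, 80), 'Res'),
--     ((109, 207, 246), 'Commmer'),
--     ((145, 61, 105), 'Idust'),
--     ((168, 99, 168), 'Idust'),
--     ((196, 181, 255), 'Commmer'),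
--     ((198, 156, 109), 'plaza'),
--     ((222, 237, 203), 'alley'),
--     ((237, 27, 35), 'Center'),
--     ((252, 198, 137), 'cover'),
--     ((255, 125, 0), 'mroads'),
--     ((255, 125, 125), 'plaza'),
--     ((255, 247, 153), 'cover'),
--     ((255, 255, 0), 'ped'),
-- ]
--
-- def color2use(color):
--     lo, hi = 0, len(_TABLE)
--     while lo < hi:
--         mid = (lo + hi) // 2
--         key, label = _TABLE[mid]
--         if color == key:
--             return label
--         if color < key:
--             hi = mid
--         else:
--             lo = mid + 1
--     return 'False'
-- ===== Notes on version B (the rewrite author's own statement) =====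
-- stated objective: alternative
-- what changed: Replaces the while-True if/elif comparison cascade with a table of (RGB,label) pairs stored in sorted order and a hand-written lo/hi binary search using lexicographic tuple comparison (the unreachable 'Retail' branch is dropped; unknown colors fall through to 'False').
import Mathlib
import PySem

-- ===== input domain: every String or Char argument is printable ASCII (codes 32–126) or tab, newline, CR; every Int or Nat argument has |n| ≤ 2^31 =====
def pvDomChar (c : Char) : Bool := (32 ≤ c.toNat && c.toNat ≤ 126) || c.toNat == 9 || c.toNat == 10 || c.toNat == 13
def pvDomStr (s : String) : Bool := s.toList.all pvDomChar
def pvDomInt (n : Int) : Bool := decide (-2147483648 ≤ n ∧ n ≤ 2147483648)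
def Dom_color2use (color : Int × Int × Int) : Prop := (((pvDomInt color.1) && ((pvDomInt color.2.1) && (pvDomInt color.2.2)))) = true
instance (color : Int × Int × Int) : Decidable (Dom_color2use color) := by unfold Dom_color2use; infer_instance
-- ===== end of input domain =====

-- B replaces A's while-True if/elif cascade with a sorted (RGB,label) table and a hand-written binary search (alternative algorithm).

-- ===== PORT A =====
def color2use (color : Int × Int × Int) : String :=
  -- while True: first iteration always returns (final branch is 0==0)
  if color = (252,198,137) ∨ color = (255,247,153) then "cover"
  else if color = (198,156,109) ∨ color = (255,125,125) then "plaza"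
  else if color = (196,181,255) ∨ color = (109,207,246) then "Commmer"
  else if color = (255,125,0) then "mroads"
  else if color = (168,99,168) ∨ color = (145,61,105) then "Idust"
  else if color = (109,207,246) then "Retail"
  else if color = (0,166,80) then "Res"
  else if color = (0,114,54) ∨ color = (222,237,203) then "alley"
  else if color = (237,27,35) then "Center"
  else if color = (0,0,255) then "edge"
  else if color = (255,255,0) then "ped"
  else "False"

-- ===== PORT B =====
-- the sorted table _TABLE of Source B
def pvTable : List ((Int × Int × Int) × String) :=
  [((0,0,255), "edge"),
   ((0,114,54), "alley"),
   ((0,166,80), "Res"),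
   ((109,207,246), "Commmer"),
   ((145,61,105), "Idust"),
   ((168,99,168), "Idust"),
   ((196,181,255), "Commmer"),
   ((198,156,109), "plaza"),
   ((222,237,203), "alley"),
   ((237,27,35), "Center"),
   ((252,198,137), "cover"),
   ((255,125,0), "mroads"),
   ((255,125,125), "plaza"),
   ((255,247,153), "cover"),
   ((255,255,0), "ped")]

-- Python's lexicographic '<' on int triples (exact on Int × Int × Int)
def pvTupLt (a b : Int × Int × Int) : Bool :=
  a.1 < b.1 || (a.1 = b.1 && (a.2.1 < b.2.1 || (a.2.1 = b.2.1 && a.2.2 < b.2.2)))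

-- the while lo < hi loop of Source B; the fuel argument only makes the loop total
-- (hi - lo shrinks at every iteration, so fuel = 15 ≥ hi - lo never runs out)
def pvBsearch (color : Int × Int × Int) : Nat → Nat → Nat → String
  | 0, _, _ => "False"
  | fuel+1, lo, hi =>
    if lo < hi then
      let mid := (lo + hi) / 2
      let kv := pvTable.getD mid ((0,0,0), "")
      if color = kv.1 then kv.2
      else if pvTupLt color kv.1 then pvBsearch color fuel lo mid
      else pvBsearch color fuel (mid+1) hi
    else "False"

def color2use_alt (color : Int × Int × Int) : String :=
  pvBsearch color 15 0 15

-- ===== PRECONDITION & SPEC =====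
def Spec_color2use (color : Int × Int × Int) (out : String) : Prop := out = color2use_alt color
instance (color : Int × Int × Int) (out : String) : Decidable (Spec_color2use color out) := by unfold Spec_color2use; infer_instance

-- ===== CLAIM (what is proved, stated in full; the proofs are below) =====
def Claim_equal_color2use : Prop := ∀ (color : Int × Int × Int), Dom_color2use color → Spec_color2use color (color2use color)

-- ===== LEMMAS AND PROOFS =====

-- a miss of the sorted table: binary search over any in-range window returns "False"
theorem pvBsearch_miss (c : Int × Int × Int) (hne : ∀ kv ∈ pvTable, c ≠ kv.1) :
    ∀ fuel lo hi, hi ≤ pvTable.length → pvBsearch c fuel lo hi = "False" := by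
  intro fuel
  induction fuel with
  | zero => intro lo hi _; rfl
  | succ n ih =>
    intro lo hi hhi
    rw [pvBsearch]
    by_cases hlt : lo < hi
    · simp only [if_pos hlt]
      have hmid : (lo + hi) / 2 < pvTable.length := lt_of_lt_of_le (by omega) hhi
      have hkv : pvTable.getD ((lo + hi) / 2) ((0,0,0), "") = pvTable[(lo + hi) / 2] :=
        List.getD_eq_getElem pvTable _ hmid
      have hne' : c ≠ (pvTable[(lo + hi) / 2]).1 := hne _ (List.getElem_mem hmid)
      rw [hkv, if_neg hne']
      by_cases hl : pvTupLt c (pvTable[(lo + hi) / 2]).1 = true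
      · rw [if_pos hl]; exact ih lo ((lo + hi) / 2) (by omega)
      · rw [if_neg hl]; exact ih ((lo + hi) / 2 + 1) hi hhi
    · simp [hlt]

-- ===== VERDICT (by name: the statement is the Claim_ definition above) =====
theorem color2use_spec : Claim_equal_color2use := by
  intro c _
  unfold Spec_color2use
  by_cases h0 : c = ((0,0,255) : Int × Int × Int); · subst h0; decide
  by_cases h1 : c = ((0,114,54) : Int × Int × Int); · subst h1; decide
  by_cases h2 : c = ((0,166,80) : Int × Int × Int); · subst h2; decide
  by_cases h3 : c = ((109,207,246) : Int × Int × Int); · subst h3; decide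
  by_cases h4 : c = ((145,61,105) : Int × Int × Int); · subst h4; decide
  by_cases h5 : c = ((168,99,168) : Int × Int × Int); · subst h5; decide
  by_cases h6 : c = ((196,181,255) : Int × Int × Int); · subst h6; decide
  by_cases h7 : c = ((198,156,109) : Int × Int × Int); · subst h7; decide
  by_cases h8 : c = ((222,237,203) : Int × Int × Int); · subst h8; decide
  by_cases h9 : c = ((237,27,35) : Int × Int × Int); · subst h9; decide
  by_cases h10 : c = ((252,198,137) : Int × Int × Int); · subst h10; decide
  by_cases h11 : c = ((255,125,0) : Int × Int × Int); · subst h11; decide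
  by_cases h12 : c = ((255,125,125) : Int × Int × Int); · subst h12; decide
  by_cases h13 : c = ((255,247,153) : Int × Int × Int); · subst h13; decide
  by_cases h14 : c = ((255,255,0) : Int × Int × Int); · subst h14; decide
  have hA : color2use c = "False" := by
    simp [color2use, h0, h1, h2, h3, h4, h5, h6, h7, h8, h9, h10, h11, h12, h13, h14]
  rw [hA]
  have hne : ∀ kv ∈ pvTable, c ≠ kv.1 := by
    intro kv hkv
    fin_cases hkv <;> assumption
  exact (pvBsearch_miss c hne 15 0 15 (by decide)).symm
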